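-- pv_equiv track=rewrite | github.com/talkativeteam/recruiter-job-tracker | execution/validate_job_icp_fit.py | _infer_seniority_level
-- ===== SOURCE A (Python) =====
-- from typing import Dict, List, Any, Optional
--
-- def _infer_seniority_level(recruiter_icp: Dict[str, Any]) -> str:
--     """Infer seniority level from roles and industries"""
--     roles = recruiter_icp.get("roles_filled", [])
--     industries = recruiter_icp.get("industries", [])
--
--     # Check for executive indicators
--     executive_keywords = ["VP", "Vice President", "Director", "Head of", "Chief", "SVP", "C-Suite", "Executive", "GM", "General Manager"]
--     for role in roles:
--         if any(keyword.lower() in role.lower() for keyword in executive_keywords):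
--             return "Executive/Senior Leadership ($150k-$500k+)"
--
--     # Check for mid-level indicators
--     mid_keywords = ["Manager", "Senior", "Lead", "Sr."]
--     for role in roles:
--         if any(keyword.lower() in role.lower() for keyword in mid_keywords):
--             if not any(ex.lower() in role.lower() for ex in ["VP", "Director", "Head"]):
--                 return "Mid-Level Management ($80k-$150k)"
--
--     # Check for entry-level indicators
--     entry_keywords = ["Associate", "Coordinator", "Junior", "Assistant", "Analyst"]
--     for role in roles:
--         if any(keyword.lower() in role.lower() for keyword in entry_keywords):
--             return "Entry-Level/Individual Contributor ($40k-$80k)"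
--
--     # Default to mid-senior if unclear
--     return "Mid-Senior Level ($80k-$200k)"
-- ===== SOURCE B (Python) =====
-- _EXEC = ["vp", "vice president", "director", "head of", "chief", "svp", "c-suite", "executive", "gm", "general manager"]
-- _MID = ["manager", "senior", "lead", "sr."]
-- _MID_EXCL = ["vp", "director", "head"]
-- _ENTRY = ["associate", "coordinator", "junior", "assistant", "analyst"]
--
--
-- def _rank(role):
--     """Priority rank of one role string: 3 executive, 2 mid (not excluded), 1 entry, 0 unknown."""
--     r = role.lower()
--     if any(k in r for k in _EXEC):
--         return 3
--     if any(k in r for k in _MID) and not any(k in r for k in _MID_EXCL):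
--         return 2
--     if any(k in r for k in _ENTRY):
--         return 1
--     return 0
--
--
-- def _infer_seniority_level(recruiter_icp):
--     top = 0
--     for role in recruiter_icp.get("roles_filled", []):
--         top = max(top, _rank(role))
--     if top == 3:
--         return "Executive/Senior Leadership ($150k-$500k+)"
--     if top == 2:
--         return "Mid-Level Management ($80k-$150k)"
--     if top == 1:
--         return "Entry-Level/Individual Contributor ($40k-$80k)"
--     return "Mid-Senior Level ($80k-$200k)"
-- ===== Notes on version B (the rewrite author's own statement) =====
-- stated objective: simpler
-- what changed: Replaces A's three ordered full scans of the role list (one per seniority tier, each re-lowercasing keywords) with a single per-role rank helper and one accumulation pass taking the maximum rank, followed by a rank-to-label lookup.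
import Mathlib
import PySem

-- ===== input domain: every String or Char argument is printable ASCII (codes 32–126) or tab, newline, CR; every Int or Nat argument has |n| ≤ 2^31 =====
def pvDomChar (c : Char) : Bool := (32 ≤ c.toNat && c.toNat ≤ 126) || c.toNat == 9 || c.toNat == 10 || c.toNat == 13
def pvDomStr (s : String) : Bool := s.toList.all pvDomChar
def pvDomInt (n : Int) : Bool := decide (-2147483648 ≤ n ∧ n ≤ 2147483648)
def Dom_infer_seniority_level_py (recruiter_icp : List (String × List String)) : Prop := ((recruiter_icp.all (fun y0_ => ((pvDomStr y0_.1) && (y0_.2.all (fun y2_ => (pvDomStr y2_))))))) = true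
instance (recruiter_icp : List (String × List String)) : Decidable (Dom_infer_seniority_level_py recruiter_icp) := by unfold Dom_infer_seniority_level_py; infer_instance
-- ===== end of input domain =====

-- B replaces A's three ordered scans of the roles with one per-role rank helper, a single
-- max-accumulation pass and a rank-to-label dispatch (objective: simpler).

-- ===== PORT A =====
def pvExecKw : List String := ["VP", "Vice President", "Director", "Head of", "Chief", "SVP", "C-Suite", "Executive", "GM", "General Manager"]
def pvMidKw : List String := ["Manager", "Senior", "Lead", "Sr."]
def pvMidExKw : List String := ["VP", "Director", "Head"]
def pvEntryKw : List String := ["Associate", "Coordinator", "Junior", "Assistant", "Analyst"]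

def infer_seniority_level_py (recruiter_icp : List (String × List String)) : String :=
  let roles := (PySem.Dict.mk recruiter_icp).getD "roles_filled" []
  if roles.any (fun role => pvExecKw.any (fun k => PySem.Str.isIn (PySem.Str.lower k) (PySem.Str.lower role))) then
    "Executive/Senior Leadership ($150k-$500k+)"
  else if roles.any (fun role =>
      pvMidKw.any (fun k => PySem.Str.isIn (PySem.Str.lower k) (PySem.Str.lower role)) &&
      !(pvMidExKw.any (fun ex => PySem.Str.isIn (PySem.Str.lower ex) (PySem.Str.lower role)))) then
    "Mid-Level Management ($80k-$150k)"
  else if roles.any (fun role => pvEntryKw.any (fun k => PySem.Str.isIn (PySem.Str.lower k) (PySem.Str.lower role))) then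
    "Entry-Level/Individual Contributor ($40k-$80k)"
  else
    "Mid-Senior Level ($80k-$200k)"

-- ===== PORT B =====
def pvExecL : List String := ["vp", "vice president", "director", "head of", "chief", "svp", "c-suite", "executive", "gm", "general manager"]
def pvMidL : List String := ["manager", "senior", "lead", "sr."]
def pvMidExL : List String := ["vp", "director", "head"]
def pvEntryL : List String := ["associate", "coordinator", "junior", "assistant", "analyst"]

def pvRank (role : String) : Nat :=
  let r := PySem.Str.lower role
  if pvExecL.any (fun k => PySem.Str.isIn k r) then 3
  else if pvMidL.any (fun k => PySem.Str.isIn k r) && !(pvMidExL.any (fun k => PySem.Str.isIn k r)) then 2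
  else if pvEntryL.any (fun k => PySem.Str.isIn k r) then 1
  else 0

def infer_seniority_level_py_alt (recruiter_icp : List (String × List String)) : String :=
  let top := ((PySem.Dict.mk recruiter_icp).getD "roles_filled" []).foldl (fun m role => max m (pvRank role)) 0
  if top = 3 then "Executive/Senior Leadership ($150k-$500k+)"
  else if top = 2 then "Mid-Level Management ($80k-$150k)"
  else if top = 1 then "Entry-Level/Individual Contributor ($40k-$80k)"
  else "Mid-Senior Level ($80k-$200k)"

-- ===== PRECONDITION & SPEC =====
def Spec_infer_seniority_level_py (recruiter_icp : List (String × List String)) (out : String) : Prop := out = infer_seniority_level_py_alt recruiter_icp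
instance (recruiter_icp : List (String × List String)) (out : String) : Decidable (Spec_infer_seniority_level_py recruiter_icp out) := by unfold Spec_infer_seniority_level_py; infer_instance

-- ===== CLAIM (what is proved, stated in full; the proofs are below) =====
def Claim_equal_infer_seniority_level_py : Prop := ∀ (recruiter_icp : List (String × List String)), Dom_infer_seniority_level_py recruiter_icp → Spec_infer_seniority_level_py recruiter_icp (infer_seniority_level_py recruiter_icp)

-- ===== LEMMAS AND PROOFS =====

-- the per-role conditions of A, in B's lowercase-keyword form
def bExec (r : String) : Bool := pvExecL.any (fun k => PySem.Str.isIn k (PySem.Str.lower r))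
def bMid (r : String) : Bool :=
  pvMidL.any (fun k => PySem.Str.isIn k (PySem.Str.lower r)) &&
  !(pvMidExL.any (fun k => PySem.Str.isIn k (PySem.Str.lower r)))
def bEntry (r : String) : Bool := pvEntryL.any (fun k => PySem.Str.isIn k (PySem.Str.lower r))

lemma execCond_eq (r : String) :
    pvExecKw.any (fun k => PySem.Str.isIn (PySem.Str.lower k) (PySem.Str.lower r)) = bExec r := by
  have h1 : PySem.Chars.lower ['V', 'P'] = ['v', 'p'] := by decide
  have h2 : PySem.Chars.lower ['V', 'i', 'c', 'e', ' ', 'P', 'r', 'e', 's', 'i', 'd', 'e', 'n', 't'] = ['v', 'i', 'c', 'e', ' ', 'p', 'r', 'e', 's', 'i', 'd', 'e', 'n', 't'] := by decide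
  have h3 : PySem.Chars.lower ['D', 'i', 'r', 'e', 'c', 't', 'o', 'r'] = ['d', 'i', 'r', 'e', 'c', 't', 'o', 'r'] := by decide
  have h4 : PySem.Chars.lower ['H', 'e', 'a', 'd', ' ', 'o', 'f'] = ['h', 'e', 'a', 'd', ' ', 'o', 'f'] := by decide
  have h5 : PySem.Chars.lower ['C', 'h', 'i', 'e', 'f'] = ['c', 'h', 'i', 'e', 'f'] := by decide
  have h6 : PySem.Chars.lower ['S', 'V', 'P'] = ['s', 'v', 'p'] := by decide
  have h7 : PySem.Chars.lower ['C', '-', 'S', 'u', 'i', 't', 'e'] = ['c', '-', 's', 'u', 'i', 't', 'e'] := by decide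
  have h8 : PySem.Chars.lower ['E', 'x', 'e', 'c', 'u', 't', 'i', 'v', 'e'] = ['e', 'x', 'e', 'c', 'u', 't', 'i', 'v', 'e'] := by decide
  have h9 : PySem.Chars.lower ['G', 'M'] = ['g', 'm'] := by decide
  have h10 : PySem.Chars.lower ['G', 'e', 'n', 'e', 'r', 'a', 'l', ' ', 'M', 'a', 'n', 'a', 'g', 'e', 'r'] = ['g', 'e', 'n', 'e', 'r', 'a', 'l', ' ', 'm', 'a', 'n', 'a', 'g', 'e', 'r'] := by decide
  simp [pvExecKw, pvExecL, bExec, h1, h2, h3, h4, h5, h6, h7, h8, h9, h10]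

lemma midCond_eq (r : String) :
    (pvMidKw.any (fun k => PySem.Str.isIn (PySem.Str.lower k) (PySem.Str.lower r)) &&
     !(pvMidExKw.any (fun ex => PySem.Str.isIn (PySem.Str.lower ex) (PySem.Str.lower r)))) = bMid r := by
  have h1 : PySem.Chars.lower ['M', 'a', 'n', 'a', 'g', 'e', 'r'] = ['m', 'a', 'n', 'a', 'g', 'e', 'r'] := by decide
  have h2 : PySem.Chars.lower ['S', 'e', 'n', 'i', 'o', 'r'] = ['s', 'e', 'n', 'i', 'o', 'r'] := by decide
  have h3 : PySem.Chars.lower ['L', 'e', 'a', 'd'] = ['l', 'e', 'a', 'd'] := by decide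
  have h4 : PySem.Chars.lower ['S', 'r', '.'] = ['s', 'r', '.'] := by decide
  have h5 : PySem.Chars.lower ['V', 'P'] = ['v', 'p'] := by decide
  have h6 : PySem.Chars.lower ['D', 'i', 'r', 'e', 'c', 't', 'o', 'r'] = ['d', 'i', 'r', 'e', 'c', 't', 'o', 'r'] := by decide
  have h7 : PySem.Chars.lower ['H', 'e', 'a', 'd'] = ['h', 'e', 'a', 'd'] := by decide
  simp [pvMidKw, pvMidL, pvMidExKw, pvMidExL, bMid, h1, h2, h3, h4, h5, h6, h7]

lemma entryCond_eq (r : String) :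
    pvEntryKw.any (fun k => PySem.Str.isIn (PySem.Str.lower k) (PySem.Str.lower r)) = bEntry r := by
  have h1 : PySem.Chars.lower ['A', 's', 's', 'o', 'c', 'i', 'a', 't', 'e'] = ['a', 's', 's', 'o', 'c', 'i', 'a', 't', 'e'] := by decide
  have h2 : PySem.Chars.lower ['C', 'o', 'o', 'r', 'd', 'i', 'n', 'a', 't', 'o', 'r'] = ['c', 'o', 'o', 'r', 'd', 'i', 'n', 'a', 't', 'o', 'r'] := by decide
  have h3 : PySem.Chars.lower ['J', 'u', 'n', 'i', 'o', 'r'] = ['j', 'u', 'n', 'i', 'o', 'r'] := by decide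
  have h4 : PySem.Chars.lower ['A', 's', 's', 'i', 's', 't', 'a', 'n', 't'] = ['a', 's', 's', 'i', 's', 't', 'a', 'n', 't'] := by decide
  have h5 : PySem.Chars.lower ['A', 'n', 'a', 'l', 'y', 's', 't'] = ['a', 'n', 'a', 'l', 'y', 's', 't'] := by decide
  simp [pvEntryKw, pvEntryL, bEntry, h1, h2, h3, h4, h5]

lemma pvRank_eq (r : String) :
    pvRank r = if bExec r then 3 else if bMid r then 2 else if bEntry r then 1 else 0 := rfl

-- the maximum rank, written as A-style ordered tests
def topRank (roles : List String) : Nat :=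
  if roles.any (fun r => pvRank r == 3) then 3
  else if roles.any (fun r => pvRank r == 2) then 2
  else if roles.any (fun r => pvRank r == 1) then 1
  else 0

lemma pvRank_cases (r : String) : pvRank r = 0 ∨ pvRank r = 1 ∨ pvRank r = 2 ∨ pvRank r = 3 := by
  rw [pvRank_eq]; split_ifs <;> simp

lemma topRank_cons (r : String) (rs : List String) :
    topRank (r :: rs) = max (pvRank r) (topRank rs) := by
  simp only [topRank, List.any_cons]
  rcases pvRank_cases r with h | h | h | h <;>
    by_cases h3 : rs.any (fun x => pvRank x == 3) = true <;>
    by_cases h2 : rs.any (fun x => pvRank x == 2) = true <;>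
    by_cases h1 : rs.any (fun x => pvRank x == 1) = true <;>
    simp [h, h3, h2, h1]

lemma foldl_max_rank (roles : List String) (a : Nat) :
    roles.foldl (fun m role => max m (pvRank role)) a = max a (topRank roles) := by
  induction roles generalizing a with
  | nil => simp [topRank]
  | cons r rs ih =>
    simp only [List.foldl_cons, ih, topRank_cons]
    omega

lemma pvRank_eq_three (r : String) : (pvRank r == 3) = bExec r := by
  rw [pvRank_eq]; split_ifs <;> simp_all

lemma pvRank_eq_two (r : String) (hx : bExec r = false) : (pvRank r == 2) = bMid r := by
  rw [pvRank_eq, hx]; split_ifs <;> simp_all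

lemma pvRank_eq_one (r : String) (hx : bExec r = false) (hm : bMid r = false) :
    (pvRank r == 1) = bEntry r := by
  rw [pvRank_eq, hx, hm]; split_ifs <;> simp_all

-- ===== VERDICT (by name: the statement is the Claim_ definition above) =====
theorem infer_seniority_level_py_spec : Claim_equal_infer_seniority_level_py := by
  intro icp _
  unfold Spec_infer_seniority_level_py infer_seniority_level_py infer_seniority_level_py_alt
  set roles := (PySem.Dict.mk icp).getD "roles_filled" [] with hroles
  simp only [foldl_max_rank, Nat.zero_max]
  simp only [execCond_eq, midCond_eq, entryCond_eq]
  by_cases h3 : roles.any bExec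
  · have : roles.any (fun r => pvRank r == 3) = true := by
      simp only [pvRank_eq_three]; exact h3
    simp [h3, topRank, this]
  · have hx : ∀ r ∈ roles, bExec r = false := by
      intro r hr; by_contra hc
      exact h3 (List.any_eq_true.mpr ⟨r, hr, by simpa using hc⟩)
    have e3 : roles.any (fun r => pvRank r == 3) = false := by
      rw [List.any_eq_false]; intro r hr; simp [pvRank_eq_three, hx r hr]
    by_cases h2 : roles.any bMid
    · have : roles.any (fun r => pvRank r == 2) = true := by
        obtain ⟨r, hr, hb⟩ := List.any_eq_true.mp h2
        exact List.any_eq_true.mpr ⟨r, hr, by rw [pvRank_eq_two r (hx r hr)]; exact hb⟩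
      simp [h3, h2, topRank, e3, this]
    · have hm : ∀ r ∈ roles, bMid r = false := by
        intro r hr; by_contra hc
        exact h2 (List.any_eq_true.mpr ⟨r, hr, by simpa using hc⟩)
      have e2 : roles.any (fun r => pvRank r == 2) = false := by
        rw [List.any_eq_false]; intro r hr; simp [pvRank_eq_two r (hx r hr), hm r hr]
      by_cases h1 : roles.any bEntry
      · have : roles.any (fun r => pvRank r == 1) = true := by
          obtain ⟨r, hr, hb⟩ := List.any_eq_true.mp h1
          exact List.any_eq_true.mpr ⟨r, hr, by rw [pvRank_eq_one r (hx r hr) (hm r hr)]; exact hb⟩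
        simp [h3, h2, h1, topRank, e3, e2, this]
      · have e1 : roles.any (fun r => pvRank r == 1) = false := by
          rw [List.any_eq_false]; intro r hr
          have hn : ∀ x ∈ roles, bEntry x = false := by
            intro x hxx; by_contra hc
            exact h1 (List.any_eq_true.mpr ⟨x, hxx, by simpa using hc⟩)
          simp [pvRank_eq_one r (hx r hr) (hm r hr), hn r hr]
        simp [h3, h2, h1, topRank, e3, e2, e1]
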